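-- pv_equiv track=rewrite | github.com/ohbigkite/1day_1Algorithms | 스택,큐/[프로그래머스]다리를 지나는 트럭.py | solution
-- ===== SOURCE A (Python) =====
-- from collections import deque
--
-- def solution(bridge_length, weight, truck_weights):
--     answer = 0
--     in_bridge = deque([0] * bridge_length, maxlen = bridge_length)
--     truck_weight = deque(truck_weights)
--     sum_bridge = 0
--
--     while truck_weight or (sum(in_bridge)!=0):
--         answer += 1
--         sum_bridge -= in_bridge[0]
--
--         if (len(truck_weight) != 0) and (truck_weight[0] + sum_bridge <= weight):
--             sum_bridge += truck_weight[0]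
--             in_bridge.append(truck_weight.popleft())
--         else:
--             in_bridge.append(0)
--
--     return answer
-- ===== SOURCE B (Python) =====
-- from collections import deque
--
-- def solution(bridge_length, weight, truck_weights):
--     # Event-driven: loop over trucks, keep (exit_time, weight) of trucks on the bridge.
--     time = 0
--     cur = 0
--     on = deque()
--     for w in truck_weights:
--         time += 1
--         while on and on[0][0] <= time:
--             cur -= on.popleft()[1]
--         while cur + w > weight:
--             t, ww = on.popleft()
--             time = t
--             cur -= ww
--         on.append((time + bridge_length, w))
--         cur += w
--     # advance through the remaining departures until the bridge is empty
--     while cur: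
--         exit_time, ww = on.popleft()
--         time = exit_time
--         cur -= ww
--     return time
-- ===== Notes on version B (the rewrite author's own statement) =====
-- stated objective: alternative
-- what changed: Replaces the per-time-tick simulation over a zero-padded fixed-length deque (recomputing sum(in_bridge) every tick) with an event-driven loop over the trucks that keeps a deque of (exit_time, weight) pairs and a running load, jumping the clock straight to the next exit when a truck does not fit, then draining the remaining departures until the bridge is empty; Pre_ excludes bridge_length <= 0 (A raises, except the trivial empty-truck case) and trucks heavier than the limit (A usually loops forever).
-- outside the precondition, e.g. on solution(0, 5, []): A returns 0, B returns 0; on solution(2, 5, [-10, 6]): A returns 4, B returns 4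
import Mathlib
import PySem

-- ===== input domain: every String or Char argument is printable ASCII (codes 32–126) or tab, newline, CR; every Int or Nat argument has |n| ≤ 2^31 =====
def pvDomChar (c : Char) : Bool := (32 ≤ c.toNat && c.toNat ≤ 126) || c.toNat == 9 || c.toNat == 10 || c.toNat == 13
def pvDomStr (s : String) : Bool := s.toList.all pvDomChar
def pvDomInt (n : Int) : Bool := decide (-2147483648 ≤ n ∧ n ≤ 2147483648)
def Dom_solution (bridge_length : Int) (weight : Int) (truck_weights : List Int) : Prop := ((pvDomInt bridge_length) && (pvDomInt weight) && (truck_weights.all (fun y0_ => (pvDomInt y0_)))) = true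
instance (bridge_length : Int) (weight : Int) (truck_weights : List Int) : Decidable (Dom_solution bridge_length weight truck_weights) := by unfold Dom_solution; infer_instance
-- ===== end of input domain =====

-- B replaces A's per-tick simulation by an event-driven loop over the trucks, jumping the clock between events.

-- ===== PORT A =====
-- the while loop of A, with fuel (a bound on the number of ticks; Pre_ guarantees it suffices)
def aLoop (weight : Int) : Nat → Int → List Int → List Int → Int → Int
  | 0, answer, _, _, _ => answer
  | fuel + 1, answer, bridge, trucks, sumB =>
    if trucks = [] ∧ bridge.sum = 0 then answer
    else
      match trucks with
      | t :: rest =>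
        if t + (sumB - bridge.headD 0) ≤ weight then
          aLoop weight fuel (answer + 1) (bridge.tail ++ [t]) rest ((sumB - bridge.headD 0) + t)
        else
          aLoop weight fuel (answer + 1) (bridge.tail ++ [0]) (t :: rest) (sumB - bridge.headD 0)
      | [] => aLoop weight fuel (answer + 1) (bridge.tail ++ [0]) [] (sumB - bridge.headD 0)

def solution (bridge_length : Int) (weight : Int) (truck_weights : List Int) : Int :=
  aLoop weight ((truck_weights.length + 1) * (bridge_length.toNat + 1) + 1) 0
    (List.replicate bridge_length.toNat 0) truck_weights 0

-- ===== PORT B =====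
-- while on and on[0][0] <= time: cur -= on.popleft()[1]
def popExits (time : Int) : Int → List (Int × Int) → Int × List (Int × Int)
  | cur, [] => (cur, [])
  | cur, (e, w) :: rest => if e ≤ time then popExits time (cur - w) rest else (cur, (e, w) :: rest)

-- while cur + w > weight: time, cur updated from on.popleft()  (Python raises on empty deque; unreachable under Pre_)
def popFit (weight w : Int) : Int → Int → List (Int × Int) → Int × Int × List (Int × Int)
  | time, cur, [] => (time, cur, [])
  | time, cur, (e, ww) :: rest =>
    if weight < cur + w then popFit weight w e (cur - ww) rest else (time, cur, (e, ww) :: rest)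

def bLoop (bl weight : Int) : Int → Int → List (Int × Int) → List Int → Int × Int × List (Int × Int)
  | time, cur, on, [] => (time, cur, on)
  | time, cur, on, w :: rest =>
    let p := popExits (time + 1) cur on
    let q := popFit weight w (time + 1) p.1 p.2
    bLoop bl weight q.1 (q.2.1 + w) (q.2.2 ++ [(q.1 + bl, w)]) rest

-- while cur: time, cur updated from on.popleft()  (Python raises on an empty deque there;
-- cur is always the sum of the weights still on the bridge, so that state is unreachable)
def drainB (time cur : Int) (on : List (Int × Int)) : Int :=
  if cur = 0 then time
  else
    match on with
    | [] => time
    | (e, w) :: rest => drainB e (cur - w) rest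

def solution_alt (bridge_length : Int) (weight : Int) (truck_weights : List Int) : Int :=
  drainB (bLoop bridge_length weight 0 0 [] truck_weights).1
    (bLoop bridge_length weight 0 0 [] truck_weights).2.1
    (bLoop bridge_length weight 0 0 [] truck_weights).2.2

-- ===== PRECONDITION & SPEC =====
-- Pre_ excludes: bridge_length ≤ 0 (A's deque construction/indexing raises, except the trivial empty-truck
-- case, where both return 0); and trucks heavier than the weight limit, on which A usually loops forever
-- (and B raises) — in the boundary cases where such a truck still crosses thanks to a negative load
-- already on the bridge, both programs in fact return the same value.
def Pre_solution (bridge_length : Int) (weight : Int) (truck_weights : List Int) : Prop :=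
  1 ≤ bridge_length ∧ ∀ w ∈ truck_weights, w ≤ weight
instance (bridge_length : Int) (weight : Int) (truck_weights : List Int) : Decidable (Pre_solution bridge_length weight truck_weights) := by unfold Pre_solution; infer_instance

def pvWitness_solution : Int × Int × List Int := (2, 10, [7, 4, 5, 6])

def Spec_solution (bridge_length : Int) (weight : Int) (truck_weights : List Int) (out : Int) : Prop := out = solution_alt bridge_length weight truck_weights
instance (bridge_length : Int) (weight : Int) (truck_weights : List Int) (out : Int) : Decidable (Spec_solution bridge_length weight truck_weights out) := by unfold Spec_solution; infer_instance

-- ===== CLAIM (what is proved, stated in full; the proofs are below) =====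
def Claim_equal_solution : Prop := ∀ (bridge_length : Int) (weight : Int) (truck_weights : List Int), Dom_solution bridge_length weight truck_weights → Pre_solution bridge_length weight truck_weights → Spec_solution bridge_length weight truck_weights (solution bridge_length weight truck_weights)

-- ===== LEMMAS AND PROOFS =====

-- weight of the truck leaving at tick v (0 if none)
def lookupE : List (Int × Int) → Int → Int
  | [], _ => 0
  | (e, w) :: rest, v => if e = v then w else lookupE rest v

-- A's bridge deque reconstructed from B's event list, at loop-top time t
def toBridge (t bl : Int) (on : List (Int × Int)) : List Int :=
  (List.range bl.toNat).map (fun (p : Nat) => lookupE on (t + (p : Int) + 1))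

def sumOn (on : List (Int × Int)) : Int := (on.map (·.2)).sum

-- invariant on B's event list at loop-top time t
def BInv (t bl : Int) (on : List (Int × Int)) : Prop :=
  on.Pairwise (fun a b => a.1 < b.1) ∧ ∀ p ∈ on, t < p.1 ∧ p.1 ≤ t + bl

-- B's whole body for one truck
def stepB (weight w t cur : Int) (on : List (Int × Int)) : Int × Int × List (Int × Int) :=
  popFit weight w (t + 1) (popExits (t + 1) cur on).1 (popExits (t + 1) cur on).2

theorem bLoop_cons (bl weight t cur w : Int) (on : List (Int × Int)) (rest : List Int) :
    bLoop bl weight t cur on (w :: rest) =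
      bLoop bl weight (stepB weight w t cur on).1 ((stepB weight w t cur on).2.1 + w)
        ((stepB weight w t cur on).2.2 ++ [((stepB weight w t cur on).1 + bl, w)]) rest := by
  simp [bLoop, stepB]

theorem sumOn_nil : sumOn [] = 0 := rfl

theorem sumOn_cons (p : Int × Int) (rest : List (Int × Int)) :
    sumOn (p :: rest) = p.2 + sumOn rest := by simp [sumOn]

theorem sumOn_append_single (a : List (Int × Int)) (x : Int × Int) :
    sumOn (a ++ [x]) = sumOn a + x.2 := by simp [sumOn]

theorem lookupE_zero (on : List (Int × Int)) (v : Int) (h : ∀ p ∈ on, p.1 ≠ v) :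
    lookupE on v = 0 := by
  induction on with
  | nil => rfl
  | cons p rest ih =>
    obtain ⟨e, w⟩ := p
    have he : e ≠ v := h (e, w) (by simp)
    simp [lookupE, he]
    exact ih (fun q hq => h q (by simp [hq]))

theorem lookupE_append_ne (a : List (Int × Int)) (e w v : Int) (h : e ≠ v) :
    lookupE (a ++ [(e, w)]) v = lookupE a v := by
  induction a with
  | nil => simp [lookupE, h]
  | cons p rest ih =>
    obtain ⟨e', w'⟩ := p
    by_cases h' : e' = v <;> simp [lookupE, h', ih]

theorem lookupE_append_last (a : List (Int × Int)) (v w : Int) (h : ∀ p ∈ a, p.1 ≠ v) :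
    lookupE (a ++ [(v, w)]) v = w := by
  induction a with
  | nil => simp [lookupE]
  | cons p rest ih =>
    obtain ⟨e', w'⟩ := p
    have : e' ≠ v := h (e', w') (by simp)
    simp [lookupE, this]
    exact ih (fun q hq => h q (by simp [hq]))

theorem toBridge_shift (t bl : Int) (on : List (Int × Int)) (hbl : 1 ≤ bl) :
    toBridge (t + 1) bl on = (toBridge t bl on).tail ++ [lookupE on (t + 1 + bl)] := by
  obtain ⟨k, hk⟩ : ∃ k, bl.toNat = k + 1 := ⟨bl.toNat - 1, by omega⟩
  have hblk : (bl : Int) = (k : Int) + 1 := by omega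
  unfold toBridge
  rw [hk]
  conv_lhs => rw [List.range_succ]
  conv_rhs => rw [List.range_succ_eq_map]
  simp only [List.map_append, List.map_cons, List.map_map, List.tail_cons, List.map_nil]
  congr 1
  · apply List.map_congr_left
    intro p _
    simp only [Function.comp_apply]
    congr 1
    push_cast
    ring
  · congr 2
    omega

theorem toBridge_head (t bl : Int) (on : List (Int × Int)) (hbl : 1 ≤ bl) :
    (toBridge t bl on).headD 0 = lookupE on (t + 1) := by
  obtain ⟨k, hk⟩ : ∃ k, bl.toNat = k + 1 := ⟨bl.toNat - 1, by omega⟩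
  unfold toBridge
  rw [hk, List.range_succ_eq_map]
  simp

theorem map_range_congr (n : Nat) (f g : Nat → Int) (h : ∀ p, p < n → f p = g p) :
    (List.range n).map f = (List.range n).map g :=
  List.map_congr_left (fun a ha => h a (List.mem_range.mp ha))

theorem toBridge_nil (t bl : Int) : toBridge t bl [] = List.replicate bl.toNat 0 := by
  unfold toBridge
  have : (fun (p : Nat) => lookupE [] (t + (p : Int) + 1)) = fun (_ : Nat) => (0 : Int) := rfl
  rw [this, List.map_const']
  simp

theorem toBridge_append_far (t bl : Int) (a : List (Int × Int)) (e w : Int) (he : t + bl < e) :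
    toBridge t bl (a ++ [(e, w)]) = toBridge t bl a := by
  unfold toBridge
  apply map_range_congr
  intro p hp
  apply lookupE_append_ne
  omega

theorem toBridge_tail_cons (t bl w0 : Int) (rest : List (Int × Int)) :
    (toBridge t bl ((t + 1, w0) :: rest)).tail = (toBridge t bl rest).tail := by
  rcases Nat.eq_zero_or_pos bl.toNat with h | h
  · unfold toBridge; rw [h]; simp
  · obtain ⟨k, hk⟩ : ∃ k, bl.toNat = k + 1 := ⟨bl.toNat - 1, by omega⟩
    unfold toBridge
    rw [hk, List.range_succ_eq_map]
    simp only [List.map_cons, List.tail_cons, List.map_map]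
    apply map_range_congr
    intro p _
    simp only [Function.comp_apply, lookupE]
    rw [if_neg (by push_cast; omega)]

theorem sum_indicator (w0 : Int) (n : Nat) : ∀ (p0 : Nat) (f g : Nat → Int), p0 < n →
    (∀ p, p < n → f p = g p + if p = p0 then w0 else 0) →
    ((List.range n).map f).sum = ((List.range n).map g).sum + w0 := by
  induction n with
  | zero => omega
  | succ n ih =>
    intro p0 f g hp hfg
    rw [List.range_succ]
    simp only [List.map_append, List.map_cons, List.map_nil, List.sum_append, List.sum_cons,
      List.sum_nil]
    by_cases h0 : p0 = n
    · have hsame : (List.range n).map f = (List.range n).map g := by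
        apply List.map_congr_left
        intro p hp'
        have hplt := List.mem_range.mp hp'
        have := hfg p (by omega)
        rw [if_neg (by omega)] at this
        omega
      have := hfg n (by omega)
      rw [if_pos h0.symm] at this
      rw [hsame]
      omega
    · have h1 := hfg n (by omega)
      rw [if_neg (fun h => h0 h.symm)] at h1
      have h2 := ih p0 f g (by omega) (fun p hp' => hfg p (by omega))
      omega

theorem sum_toBridge (t bl : Int) (on : List (Int × Int)) (hI : BInv t bl on) :
    (toBridge t bl on).sum = sumOn on := by
  obtain ⟨hpw, hwin⟩ := hI
  induction on with
  | nil => simp [toBridge_nil, sumOn]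
  | cons p rest ih =>
    obtain ⟨e, w0⟩ := p
    have hew := hwin (e, w0) (by simp)
    have hrest : ∀ q ∈ rest, e < q.1 := by
      intro q hq
      exact (List.pairwise_cons.mp hpw).1 q hq
    have hsum : (toBridge t bl rest).sum = sumOn rest := by
      apply ih (List.pairwise_cons.mp hpw).2
      intro q hq; exact hwin q (by simp [hq])
    have hp0 : ((e - t - 1).toNat : Int) = e - t - 1 := by omega
    have hp0lt : (e - t - 1).toNat < bl.toNat := by omega
    unfold toBridge
    rw [sum_indicator w0 bl.toNat (e - t - 1).toNat
      (fun p => lookupE ((e, w0) :: rest) (t + p + 1))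
      (fun p => lookupE rest (t + p + 1)) hp0lt ?_]
    · have hdef : (List.range bl.toNat).map (fun (p : Nat) => lookupE rest (t + (p : Int) + 1))
          = toBridge t bl rest := rfl
      rw [hdef, hsum, sumOn_cons]
      ring
    · intro p hp
      by_cases hpe : p = (e - t - 1).toNat
      · subst hpe
        rw [if_pos rfl]
        simp only [lookupE]
        rw [if_pos (by omega)]
        rw [lookupE_zero rest (t + ((e - t - 1).toNat : Int) + 1)
          (fun q hq => by have := hrest q hq; omega)]
        omega
      · rw [if_neg hpe]
        simp only [lookupE]
        rw [if_neg (by omega)]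
        omega

theorem popExits_nop (time c : Int) (on : List (Int × Int)) (h : ∀ p ∈ on, time < p.1) :
    popExits time c on = (c, on) := by
  cases on with
  | nil => rfl
  | cons p rest =>
    obtain ⟨e, w⟩ := p
    have := h (e, w) (by simp)
    simp [popExits]
    omega

theorem popExits_spec (t bl : Int) (on : List (Int × Int)) (hI : BInv t bl on) :
    (popExits (t + 1) (sumOn on) on).1 = sumOn on - lookupE on (t + 1) ∧
    (popExits (t + 1) (sumOn on) on).1 = sumOn (popExits (t + 1) (sumOn on) on).2 ∧
    (popExits (t + 1) (sumOn on) on).2.Pairwise (fun a b => a.1 < b.1) ∧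
    (∀ p ∈ (popExits (t + 1) (sumOn on) on).2, t + 1 < p.1 ∧ p.1 ≤ t + bl) ∧
    (toBridge t bl on).tail = (toBridge t bl (popExits (t + 1) (sumOn on) on).2).tail ∧
    ((popExits (t + 1) (sumOn on) on).2 = on ∨
      ∃ w0, on = (t + 1, w0) :: (popExits (t + 1) (sumOn on) on).2) := by
  obtain ⟨hpw, hwin⟩ := hI
  cases on with
  | nil => simp [popExits, lookupE, sumOn]
  | cons p rest =>
    obtain ⟨e, w0⟩ := p
    have hew := hwin (e, w0) (by simp)
    have hrest : ∀ q ∈ rest, e < q.1 := (List.pairwise_cons.mp hpw).1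
    by_cases he : e ≤ t + 1
    · have he1 : e = t + 1 := by omega
      subst he1
      have hstep : popExits (t + 1) (sumOn ((t + 1, w0) :: rest)) ((t + 1, w0) :: rest)
          = (sumOn ((t + 1, w0) :: rest) - w0, rest) := by
        simp only [popExits, if_pos (le_refl (t + 1))]
        exact popExits_nop _ _ rest (fun q hq => hrest q hq)
      rw [hstep]
      refine ⟨by simp [lookupE], by rw [sumOn_cons]; ring_nf, (List.pairwise_cons.mp hpw).2,
        ?_, toBridge_tail_cons t bl w0 rest, Or.inr ⟨w0, rfl⟩⟩
      intro q hq
      have h1 := hrest q hq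
      have h2 := hwin q (by simp [hq])
      exact ⟨h1, h2.2⟩
    · have hnop : popExits (t + 1) (sumOn ((e, w0) :: rest)) ((e, w0) :: rest)
          = (sumOn ((e, w0) :: rest), (e, w0) :: rest) := by
        apply popExits_nop
        intro q hq
        rcases List.mem_cons.mp hq with h | h
        · subst h; omega
        · have := hrest q h; omega
      rw [hnop]
      have hlz : lookupE ((e, w0) :: rest) (t + 1) = 0 := by
        apply lookupE_zero
        intro q hq
        rcases List.mem_cons.mp hq with h | h
        · subst h; simpa using (by omega : e ≠ t + 1)
        · have := hrest q h; omega
      refine ⟨by rw [hlz]; ring, rfl, hpw, ?_, rfl, Or.inl rfl⟩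
      intro q hq
      rcases List.mem_cons.mp hq with h | h
      · subst h; exact ⟨by omega, hew.2⟩
      · have h1 := hrest q h
        have h2 := hwin q (by simp [h])
        exact ⟨by omega, h2.2⟩

theorem popFit_fit (weight w time cur : Int) (on : List (Int × Int)) (h : ¬ weight < cur + w) :
    popFit weight w time cur on = (time, cur, on) := by
  cases on with
  | nil => rfl
  | cons p rest => obtain ⟨e, ww⟩ := p; simp [popFit, h]

theorem popFit_sum (weight w : Int) (on : List (Int × Int)) : ∀ (time cur : Int),
    (popFit weight w time cur on).2.1 - sumOn (popFit weight w time cur on).2.2 = cur - sumOn on := by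
  induction on with
  | nil => intro time cur; simp [popFit, sumOn]
  | cons p rest ih =>
    intro time cur
    obtain ⟨e, ww⟩ := p
    by_cases h : weight < cur + w
    · simp only [popFit, if_pos h]
      have := ih e (cur - ww)
      rw [sumOn_cons]
      simp at this ⊢
      omega
    · simp [popFit, h]

theorem popFit_exits (weight w : Int) (on : List (Int × Int)) : ∀ (time cur : Int),
    on.Pairwise (fun a b => a.1 < b.1) → (∀ p ∈ on, time < p.1) →
    ∀ p ∈ (popFit weight w time cur on).2.2, (popFit weight w time cur on).1 < p.1 := by
  induction on with
  | nil => intro time cur _ _ p hp; simp [popFit] at hp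
  | cons q rest ih =>
    intro time cur hpw hmem p hp
    obtain ⟨e, ww⟩ := q
    by_cases h : weight < cur + w
    · simp only [popFit, if_pos h] at hp ⊢
      exact ih e (cur - ww) (List.pairwise_cons.mp hpw).2 (List.pairwise_cons.mp hpw).1 p hp
    · simp only [popFit, if_neg h] at hp ⊢
      exact hmem p hp

theorem popFit_time_ge (weight w : Int) (on : List (Int × Int)) : ∀ (time cur : Int),
    on.Pairwise (fun a b => a.1 < b.1) → (∀ p ∈ on, time < p.1) →
    time ≤ (popFit weight w time cur on).1 := by
  induction on with
  | nil => intro time cur _ _; simp [popFit]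
  | cons q rest ih =>
    intro time cur hpw hmem
    obtain ⟨e, ww⟩ := q
    by_cases h : weight < cur + w
    · simp only [popFit, if_pos h]
      have h1 : time < e := hmem (e, ww) (by simp)
      have h2 := ih e (cur - ww) (List.pairwise_cons.mp hpw).2
        (fun p hp => (List.pairwise_cons.mp hpw).1 p hp)
      omega
    · simp [popFit, h]

theorem popFit_time_le (weight w M : Int) (on : List (Int × Int)) : ∀ (time cur : Int),
    time ≤ M → (∀ p ∈ on, p.1 ≤ M) →
    (popFit weight w time cur on).1 ≤ M := by
  induction on with
  | nil => intro time cur h _; simpa [popFit] using h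
  | cons q rest ih =>
    intro time cur hM hmem
    obtain ⟨e, ww⟩ := q
    by_cases h : weight < cur + w
    · simp only [popFit, if_pos h]
      exact ih e (cur - ww) (hmem (e, ww) (by simp)) (fun p hp => hmem p (by simp [hp]))
    · simpa [popFit, h] using hM

theorem popFit_suffix_mem (weight w : Int) (on : List (Int × Int)) : ∀ (time cur : Int),
    ∀ p ∈ (popFit weight w time cur on).2.2, p ∈ on := by
  induction on with
  | nil => intro time cur p hp; simp [popFit] at hp
  | cons q rest ih =>
    intro time cur p hp
    obtain ⟨e, ww⟩ := q
    by_cases h : weight < cur + w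
    · simp only [popFit, if_pos h] at hp
      exact List.mem_cons_of_mem _ (ih e (cur - ww) p hp)
    · simpa [popFit, h] using hp

theorem popFit_pairwise (weight w : Int) (on : List (Int × Int)) : ∀ (time cur : Int),
    on.Pairwise (fun a b => a.1 < b.1) →
    (popFit weight w time cur on).2.2.Pairwise (fun a b => a.1 < b.1) := by
  induction on with
  | nil => intro time cur _; simp [popFit]
  | cons q rest ih =>
    intro time cur hpw
    obtain ⟨e, ww⟩ := q
    by_cases h : weight < cur + w
    · simp only [popFit, if_pos h]
      exact ih e (cur - ww) (List.pairwise_cons.mp hpw).2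
    · simpa [popFit, h] using hpw

theorem tickCommute (weight w t c1 : Int) (o1 : List (Int × Int))
    (hfit : weight < c1 + w) (hpw : o1.Pairwise (fun a b => a.1 < b.1))
    (hex : ∀ p ∈ o1, t + 1 < p.1) (hne : o1 ≠ []) :
    popFit weight w (t + 1) c1 o1 =
      popFit weight w (t + 2) (popExits (t + 2) c1 o1).1 (popExits (t + 2) c1 o1).2 := by
  cases o1 with
  | nil => exact absurd rfl hne
  | cons q rest =>
    obtain ⟨e1, w1⟩ := q
    have he1 : t + 1 < e1 := hex (e1, w1) (by simp)
    have hrest : ∀ p ∈ rest, e1 < p.1 := (List.pairwise_cons.mp hpw).1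
    by_cases h : e1 ≤ t + 2
    · have he2 : e1 = t + 2 := by omega
      subst he2
      have hpe : popExits (t + 2) c1 ((t + 2, w1) :: rest) = (c1 - w1, rest) := by
        simp only [popExits, if_pos (le_refl (t + 2))]
        exact popExits_nop _ _ rest (fun q hq => hrest q hq)
      rw [hpe]
      simp only [popFit, if_pos hfit]
    · have hpe : popExits (t + 2) c1 ((e1, w1) :: rest) = (c1, (e1, w1) :: rest) := by
        apply popExits_nop
        intro q hq
        rcases List.mem_cons.mp hq with hh | hh
        · subst hh; omega
        · have := hrest q hh; omega
      rw [hpe]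
      simp only [popFit, if_pos hfit]

-- one tick of A, admitting the truck
theorem tickA_admit (weight bl w t : Int) (on : List (Int × Int)) (rest : List Int) (fuel : Nat)
    (hbl : 1 ≤ bl) (hI : BInv t bl on)
    (hfit : ¬ weight < (popExits (t + 1) (sumOn on) on).1 + w) :
    aLoop weight (fuel + 1) t (toBridge t bl on) (w :: rest) (sumOn on) =
      aLoop weight fuel (t + 1)
        (toBridge (t + 1) bl ((popExits (t + 1) (sumOn on) on).2 ++ [(t + 1 + bl, w)]))
        rest (sumOn ((popExits (t + 1) (sumOn on) on).2 ++ [(t + 1 + bl, w)])) := by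
  have hhead := toBridge_head t bl on hbl
  obtain ⟨h1, h2, h3, h4, h5, h6⟩ := popExits_spec t bl on hI
  simp only [aLoop]
  rw [if_neg (by simp)]
  rw [hhead]
  rw [if_pos (by omega : w + (sumOn on - lookupE on (t + 1)) ≤ weight)]
  have hbr : (toBridge t bl on).tail ++ [w]
      = toBridge (t + 1) bl ((popExits (t + 1) (sumOn on) on).2 ++ [(t + 1 + bl, w)]) := by
    rw [toBridge_shift t bl _ hbl]
    rw [toBridge_append_far t bl _ _ _ (by omega)]
    rw [lookupE_append_last _ _ _ (fun p hp => by have := (h4 p hp).2; omega)]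
    rw [h5]
  have hsum : sumOn on - lookupE on (t + 1) + w
      = sumOn ((popExits (t + 1) (sumOn on) on).2 ++ [(t + 1 + bl, w)]) := by
    rw [sumOn_append_single]
    omega
  rw [hbr, hsum]

-- one tick of A, skipping (truck does not fit)
theorem tickA_skip (weight bl w t : Int) (on : List (Int × Int)) (rest : List Int) (fuel : Nat)
    (hbl : 1 ≤ bl) (hI : BInv t bl on)
    (hfit : weight < (popExits (t + 1) (sumOn on) on).1 + w) :
    aLoop weight (fuel + 1) t (toBridge t bl on) (w :: rest) (sumOn on) =
      aLoop weight fuel (t + 1) (toBridge (t + 1) bl (popExits (t + 1) (sumOn on) on).2)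
        (w :: rest) (sumOn (popExits (t + 1) (sumOn on) on).2) := by
  have hhead := toBridge_head t bl on hbl
  obtain ⟨h1, h2, h3, h4, h5, h6⟩ := popExits_spec t bl on hI
  simp only [aLoop]
  rw [if_neg (by simp)]
  rw [hhead]
  rw [if_neg (by omega : ¬ (w + (sumOn on - lookupE on (t + 1)) ≤ weight))]
  have hbr : (toBridge t bl on).tail ++ [0]
      = toBridge (t + 1) bl (popExits (t + 1) (sumOn on) on).2 := by
    rw [toBridge_shift t bl _ hbl]
    rw [lookupE_zero _ _ (fun p hp => by have := (h4 p hp).2; omega)]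
    rw [h5]
  have hsum : sumOn on - lookupE on (t + 1) = sumOn (popExits (t + 1) (sumOn on) on).2 := by omega
  rw [hbr, hsum]

-- per-truck lemma: A's ticks up to (and including) the admission of truck w equal B's stepB
theorem PT (weight bl w : Int) (rest : List Int) (hbl : 1 ≤ bl) (hw2 : w ≤ weight) :
    ∀ (fuel : Nat) (t : Int) (on : List (Int × Int)), BInv t bl on →
    ((stepB weight w t (sumOn on) on).1 - t).toNat ≤ fuel + 1 →
    aLoop weight (fuel + 1) t (toBridge t bl on) (w :: rest) (sumOn on) =
      aLoop weight (fuel + 1 - ((stepB weight w t (sumOn on) on).1 - t).toNat)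
        (stepB weight w t (sumOn on) on).1
        (toBridge (stepB weight w t (sumOn on) on).1 bl
          ((stepB weight w t (sumOn on) on).2.2 ++ [((stepB weight w t (sumOn on) on).1 + bl, w)]))
        rest
        (sumOn ((stepB weight w t (sumOn on) on).2.2 ++ [((stepB weight w t (sumOn on) on).1 + bl, w)])) := by
  intro fuel
  induction fuel with
  | zero =>
    intro t on hI hfuel
    obtain ⟨h1, h2, h3, h4, h5, h6⟩ := popExits_spec t bl on hI
    by_cases hfit : weight < (popExits (t + 1) (sumOn on) on).1 + w
    · exfalso
      have hne : (popExits (t + 1) (sumOn on) on).2 ≠ [] := by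
        intro h
        rw [h, sumOn_nil] at h2
        omega
      cases hq : (popExits (t + 1) (sumOn on) on).2 with
      | nil => exact absurd hq hne
      | cons q1 rest1 =>
        obtain ⟨e1, w1⟩ := q1
        have he1 : t + 1 < e1 := (h4 (e1, w1) (by rw [hq]; simp)).1
        have hstep : t + 2 ≤ (stepB weight w t (sumOn on) on).1 := by
          simp only [stepB]
          rw [hq]
          simp only [popFit, if_pos hfit]
          have hge := popFit_time_ge weight w rest1 e1 ((popExits (t + 1) (sumOn on) on).1 - w1)
            (by rw [hq] at h3; exact (List.pairwise_cons.mp h3).2)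
            (by rw [hq] at h3; exact (List.pairwise_cons.mp h3).1)
          omega
        omega
    · have hq : stepB weight w t (sumOn on) on
          = (t + 1, (popExits (t + 1) (sumOn on) on).1, (popExits (t + 1) (sumOn on) on).2) := by
        simp only [stepB]
        exact popFit_fit _ _ _ _ _ hfit
      rw [tickA_admit weight bl w t on rest 0 hbl hI hfit, hq]
      have hk : ((t + 1) - t).toNat = 1 := by omega
      simp only [hk]
  | succ n ih =>
    intro t on hI hfuel
    obtain ⟨h1, h2, h3, h4, h5, h6⟩ := popExits_spec t bl on hI
    by_cases hfit : weight < (popExits (t + 1) (sumOn on) on).1 + w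
    · have hne : (popExits (t + 1) (sumOn on) on).2 ≠ [] := by
        intro h
        rw [h, sumOn_nil] at h2
        omega
      have hIr : BInv (t + 1) bl (popExits (t + 1) (sumOn on) on).2 :=
        ⟨h3, fun p hp => ⟨(h4 p hp).1, by have := (h4 p hp).2; omega⟩⟩
      have hcomm : stepB weight w (t + 1) (sumOn (popExits (t + 1) (sumOn on) on).2)
          (popExits (t + 1) (sumOn on) on).2 = stepB weight w t (sumOn on) on := by
        simp only [stepB]
        rw [← h2]
        rw [show t + 1 + 1 = t + 2 by ring]
        exact (tickCommute weight w t (popExits (t + 1) (sumOn on) on).1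
          (popExits (t + 1) (sumOn on) on).2 hfit h3 (fun p hp => (h4 p hp).1) hne).symm
      have hge1 : t + 1 ≤ (stepB weight w t (sumOn on) on).1 := by
        simp only [stepB]
        exact popFit_time_ge weight w _ _ _ h3 (fun p hp => (h4 p hp).1)
      rw [tickA_skip weight bl w t on rest (n + 1) hbl hI hfit]
      rw [ih (t + 1) (popExits (t + 1) (sumOn on) on).2 hIr (by rw [hcomm]; omega)]
      rw [hcomm]
      have harith : n + 1 - ((stepB weight w t (sumOn on) on).1 - (t + 1)).toNat
          = n + 1 + 1 - ((stepB weight w t (sumOn on) on).1 - t).toNat := by omega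
      rw [harith]
    · have hq : stepB weight w t (sumOn on) on
          = (t + 1, (popExits (t + 1) (sumOn on) on).1, (popExits (t + 1) (sumOn on) on).2) := by
        simp only [stepB]
        exact popFit_fit _ _ _ _ _ hfit
      rw [tickA_admit weight bl w t on rest (n + 1) hbl hI hfit, hq]
      have hk : ((t + 1) - t).toNat = 1 := by omega
      simp only [hk]
      norm_num

theorem stepB_facts (weight bl w t : Int) (on : List (Int × Int)) (hbl : 1 ≤ bl)
    (hI : BInv t bl on) :
    t + 1 ≤ (stepB weight w t (sumOn on) on).1 ∧
    (stepB weight w t (sumOn on) on).1 ≤ t + bl ∧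
    (stepB weight w t (sumOn on) on).2.1 = sumOn (stepB weight w t (sumOn on) on).2.2 ∧
    BInv (stepB weight w t (sumOn on) on).1 bl
      ((stepB weight w t (sumOn on) on).2.2 ++ [((stepB weight w t (sumOn on) on).1 + bl, w)]) := by
  obtain ⟨h1, h2, h3, h4, h5, h6⟩ := popExits_spec t bl on hI
  simp only [stepB]
  have hex1 : ∀ p ∈ (popExits (t + 1) (sumOn on) on).2, t + 1 < p.1 := fun p hp => (h4 p hp).1
  have hge := popFit_time_ge weight w (popExits (t + 1) (sumOn on) on).2 (t + 1)
    (popExits (t + 1) (sumOn on) on).1 h3 hex1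
  have hle := popFit_time_le weight w (t + bl) (popExits (t + 1) (sumOn on) on).2 (t + 1)
    (popExits (t + 1) (sumOn on) on).1 (by omega) (fun p hp => (h4 p hp).2)
  have hsum := popFit_sum weight w (popExits (t + 1) (sumOn on) on).2 (t + 1)
    (popExits (t + 1) (sumOn on) on).1
  have hpw2 := popFit_pairwise weight w (popExits (t + 1) (sumOn on) on).2 (t + 1)
    (popExits (t + 1) (sumOn on) on).1 h3
  have hex2 := popFit_exits weight w (popExits (t + 1) (sumOn on) on).2 (t + 1)
    (popExits (t + 1) (sumOn on) on).1 h3 hex1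
  have hmem2 := popFit_suffix_mem weight w (popExits (t + 1) (sumOn on) on).2 (t + 1)
    (popExits (t + 1) (sumOn on) on).1
  refine ⟨hge, hle, by omega, ?_, ?_⟩
  · rw [List.pairwise_append]
    refine ⟨hpw2, by simp, ?_⟩
    intro a ha b hb
    rw [List.mem_singleton] at hb
    subst hb
    have := (h4 a (hmem2 a ha)).2
    simp only
    omega
  · intro p hp
    rcases List.mem_append.mp hp with hp | hp
    · have hm := h4 p (hmem2 p hp)
      exact ⟨hex2 p hp, by omega⟩
    · rw [List.mem_singleton] at hp
      subst hp
      exact ⟨by omega, by omega⟩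

theorem drainB_ge (on : List (Int × Int)) : ∀ (t s : Int),
    on.Pairwise (fun a b => a.1 < b.1) → (∀ p ∈ on, t < p.1) → t ≤ drainB t s on := by
  induction on with
  | nil => intro t s _ _; simp only [drainB.eq_def]; split <;> simp
  | cons q rest ih =>
    intro t s hpw hmem
    obtain ⟨e, w⟩ := q
    by_cases hz : s = 0
    · simp [drainB, hz]
    · rw [drainB.eq_def, if_neg hz]; simp only []
      have h1 : t < e := hmem (e, w) (by simp)
      have h2 := ih e (s - w) (List.pairwise_cons.mp hpw).2 (List.pairwise_cons.mp hpw).1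
      omega

theorem drainB_cons (t s e w0 : Int) (rest : List (Int × Int)) (hz : s ≠ 0) :
    drainB t s ((e, w0) :: rest) = drainB e (s - w0) rest := by
  rw [drainB.eq_def, if_neg hz]

theorem drainB_le (on : List (Int × Int)) : ∀ (t s M : Int),
    t ≤ M → (∀ p ∈ on, p.1 ≤ M) → drainB t s on ≤ M := by
  induction on with
  | nil => intro t s M h _; rw [drainB.eq_def]; split <;> exact h
  | cons q rest ih =>
    intro t s M hM hmem
    obtain ⟨e, w⟩ := q
    by_cases hz : s = 0
    · simpa [drainB, hz] using hM
    · rw [drainB.eq_def, if_neg hz]; simp only []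
      exact ih e (s - w) M (hmem (e, w) (by simp)) (fun p hp => hmem p (by simp [hp]))

theorem drain (weight bl : Int) (hbl : 1 ≤ bl) : ∀ (fuel : Nat) (t : Int) (on : List (Int × Int)),
    BInv t bl on → (drainB t (sumOn on) on - t).toNat ≤ fuel →
    aLoop weight fuel t (toBridge t bl on) [] (sumOn on) = drainB t (sumOn on) on := by
  intro fuel
  induction fuel with
  | zero =>
    intro t on hI hf
    have hge := drainB_ge on t (sumOn on) hI.1 (fun p hp => (hI.2 p hp).1)
    have : drainB t (sumOn on) on = t := by omega
    rw [this]
    rfl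
  | succ n ihd =>
    intro t on hI hf
    by_cases hz : sumOn on = 0
    · have hA : aLoop weight (n + 1) t (toBridge t bl on) [] (sumOn on) = t := by
        simp only [aLoop]
        rw [if_pos ⟨trivial, by rw [sum_toBridge t bl on hI]; exact hz⟩]
      rw [hA, drainB.eq_def, if_pos hz]
    · have hone : on ≠ [] := by
        rintro rfl
        exact hz rfl
      obtain ⟨h1, h2, h3, h4, h5, h6⟩ := popExits_spec t bl on hI
      simp only [aLoop]
      rw [if_neg (by rw [sum_toBridge t bl on hI]; simp [hz])]
      rw [toBridge_head t bl on hbl]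
      have hbr : (toBridge t bl on).tail ++ [0]
          = toBridge (t + 1) bl (popExits (t + 1) (sumOn on) on).2 := by
        rw [toBridge_shift t bl _ hbl]
        rw [lookupE_zero _ _ (fun p hp => by have := (h4 p hp).2; omega)]
        rw [h5]
      have hsum : sumOn on - lookupE on (t + 1) = sumOn (popExits (t + 1) (sumOn on) on).2 := by
        omega
      rw [hbr, hsum]
      have hIr : BInv (t + 1) bl (popExits (t + 1) (sumOn on) on).2 :=
        ⟨h3, fun p hp => ⟨(h4 p hp).1, by have := (h4 p hp).2; omega⟩⟩
      set o2 := (popExits (t + 1) (sumOn on) on).2 with ho2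
      have hE : drainB (t + 1) (sumOn o2) o2 = drainB t (sumOn on) on := by
        rcases h6 with h6 | ⟨w0, h6⟩
        · -- nothing left the bridge this tick: unfold both sides once
          rw [h6]
          cases on with
          | nil => exact absurd rfl hone
          | cons q rest =>
            obtain ⟨e1, w1⟩ := q
            rw [drainB_cons _ _ _ _ _ hz, drainB_cons _ _ _ _ _ hz]
        · -- the front truck (exit t+1) left this tick
          conv_rhs => rw [h6]
          rw [drainB_cons _ _ _ _ _ (by rw [← h6]; exact hz)]
          have hs := sumOn_cons (t + 1, w0) o2
          congr 1
          omega
      have hge2 : t + 1 ≤ drainB (t + 1) (sumOn o2) o2 :=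
        drainB_ge _ _ _ h3 (fun p hp => (h4 p hp).1)
      rw [ihd (t + 1) o2 hIr (by omega)]
      exact hE

theorem MT (weight bl : Int) (hbl : 1 ≤ bl) : ∀ (trucks : List Int) (t : Int)
    (on : List (Int × Int)) (fuel : Nat),
    (∀ w ∈ trucks, w ≤ weight) → BInv t bl on →
    (trucks.length + 1) * (bl.toNat + 1) ≤ fuel →
    aLoop weight fuel t (toBridge t bl on) trucks (sumOn on) =
      drainB (bLoop bl weight t (sumOn on) on trucks).1
        (bLoop bl weight t (sumOn on) on trucks).2.1
        (bLoop bl weight t (sumOn on) on trucks).2.2 := by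
  intro trucks
  induction trucks with
  | nil =>
    intro t on fuel _ hI hfuel
    simp only [bLoop]
    apply drain weight bl hbl fuel t on hI
    have hge := drainB_ge on t (sumOn on) hI.1 (fun p hp => (hI.2 p hp).1)
    have hle := drainB_le on t (sumOn on) (t + bl) (by omega) (fun p hp => (hI.2 p hp).2)
    simp only [List.length_nil] at hfuel
    omega
  | cons w rest ih =>
    intro t on fuel hw hI hfuel
    have hw2 := hw w (by simp)
    obtain ⟨hge, hle, hcsum, hInew⟩ := stepB_facts weight bl w t on hbl hI
    have hk : ((stepB weight w t (sumOn on) on).1 - t).toNat ≤ bl.toNat := by omega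
    have hmul : (rest.length + 1 + 1) * (bl.toNat + 1)
        = (rest.length + 1) * (bl.toNat + 1) + (bl.toNat + 1) := by ring
    have hmul2 : bl.toNat + 1 ≤ (rest.length + 1 + 1) * (bl.toNat + 1) :=
      Nat.le_mul_of_pos_left _ (by omega)
    obtain ⟨fuel', rfl⟩ : ∃ f, fuel = f + 1 := ⟨fuel - 1, by
      simp only [List.length_cons] at hfuel
      omega⟩
    simp only [List.length_cons] at hfuel
    rw [PT weight bl w rest hbl hw2 fuel' t on hI (by omega)]
    rw [bLoop_cons]
    have hsum2 : sumOn ((stepB weight w t (sumOn on) on).2.2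
        ++ [((stepB weight w t (sumOn on) on).1 + bl, w)]) = (stepB weight w t (sumOn on) on).2.1 + w := by
      rw [sumOn_append_single]
      omega
    rw [← hsum2]
    exact ih (stepB weight w t (sumOn on) on).1 _ (fuel' + 1 - ((stepB weight w t (sumOn on) on).1 - t).toNat)
      (fun v hv => hw v (by simp [hv])) hInew (by omega)

-- ===== VERDICT (by name: the statement is the Claim_ definition above) =====
theorem solution_spec : Claim_equal_solution := by
  intro bl weight tw _ hpre
  obtain ⟨hbl, hw⟩ := hpre
  unfold Spec_solution solution solution_alt
  have hmt := MT weight bl hbl tw 0 [] ((tw.length + 1) * (bl.toNat + 1) + 1) hw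
    ⟨List.Pairwise.nil, by simp⟩ (by omega)
  rw [toBridge_nil, sumOn_nil] at hmt
  exact hmt
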